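-- pv_equiv track=rewrite | github.com/nycresistor/teletype15 | encoding.py | encodeChar
-- ===== SOURCE A (Python) =====
-- def encodeChar( imStr, figure=0, letter=0 ):
--     encoding = 0
--     for im in imStr[::-1]:  # take imstr backwards
--         encoding = encoding << 1
--         if im == '#':
--             encoding = encoding + 1
--     if figure != 0:
--         encoding = encoding + 0x40
--     if letter != 0:
--         encoding = encoding + 0x20
--     return encoding
-- ===== SOURCE B (Python) =====
-- def encodeChar(imStr, figure=0, letter=0):
--     bits = ''.join('1' if c == '#' else '0' for c in reversed(imStr))
--     encoding = int(bits, 2) if bits else 0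
--     if figure != 0:
--         encoding = encoding + 0x40
--     if letter != 0:
--         encoding = encoding + 0x20
--     return encoding
-- ===== Notes on version B (the rewrite author's own statement) =====
-- stated objective: idiomatic
-- what changed: Replaces numeric bit accumulation with a string-representation strategy: builds a reversed binary-digit string and converts it in a single base-2 int parse, then adds the flag constants.
import Mathlib
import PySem

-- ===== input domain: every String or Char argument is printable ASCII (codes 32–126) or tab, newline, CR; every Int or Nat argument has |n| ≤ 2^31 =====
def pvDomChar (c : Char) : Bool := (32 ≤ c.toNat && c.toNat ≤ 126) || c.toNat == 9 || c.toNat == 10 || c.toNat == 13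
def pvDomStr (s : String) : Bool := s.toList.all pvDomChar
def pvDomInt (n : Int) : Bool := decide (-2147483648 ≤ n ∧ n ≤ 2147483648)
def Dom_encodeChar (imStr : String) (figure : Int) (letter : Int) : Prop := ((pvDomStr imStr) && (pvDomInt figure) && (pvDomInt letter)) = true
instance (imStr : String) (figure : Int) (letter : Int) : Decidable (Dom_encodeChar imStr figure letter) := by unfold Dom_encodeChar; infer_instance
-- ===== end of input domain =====

-- B replaces A's numeric shift-accumulate loop by building a reversed binary-digit string and parsing it with a base-2 int parse (idiomatic; same cost).

-- ===== PORT A =====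
-- for im in imStr[::-1]: encoding = encoding << 1; if im == '#': encoding += 1
def encodeChar (imStr : String) (figure : Int) (letter : Int) : Int :=
  let rev := (PySem.Str.slice? imStr none none (-1)).getD ""   -- imStr[::-1] (step -1 never yields none)
  let encoding : Int := rev.toList.foldl (fun a c => let e := a * 2; if c = '#' then e + 1 else e) 0
  let encoding := if figure ≠ 0 then encoding + 0x40 else encoding
  let encoding := if letter ≠ 0 then encoding + 0x20 else encoding
  encoding

-- ===== PORT B =====
-- hand port of int(bits, 2): standard base-2 parse of a binary-digit string, exact on that domain
def parseBin2 (bits : List Char) : Int :=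
  bits.foldl (fun a c => a * 2 + (if c = '1' then 1 else 0)) 0

-- bits = ''.join('1' if c == '#' else '0' for c in reversed(imStr)); int(bits, 2) if bits else 0
def encodeChar_alt (imStr : String) (figure : Int) (letter : Int) : Int :=
  let bits : List Char := imStr.toList.reverse.map (fun c => if c = '#' then '1' else '0')
  let encoding : Int := if bits ≠ [] then parseBin2 bits else 0
  let encoding := if figure ≠ 0 then encoding + 0x40 else encoding
  let encoding := if letter ≠ 0 then encoding + 0x20 else encoding
  encoding

-- ===== PRECONDITION & SPEC =====
def Spec_encodeChar (imStr : String) (figure : Int) (letter : Int) (out : Int) : Prop := out = encodeChar_alt imStr figure letter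
instance (imStr : String) (figure : Int) (letter : Int) (out : Int) : Decidable (Spec_encodeChar imStr figure letter out) := by unfold Spec_encodeChar; infer_instance

-- ===== CLAIM (what is proved, stated in full; the proofs are below) =====
def Claim_equal_encodeChar : Prop := ∀ (imStr : String) (figure : Int) (letter : Int), Dom_encodeChar imStr figure letter → Spec_encodeChar imStr figure letter (encodeChar imStr figure letter)

-- ===== LEMMAS AND PROOFS =====

-- folding A's step over a list equals parsing its '1'/'0' image
theorem foldA_eq_parse_map (l : List Char) :
    l.foldl (fun a c => let e := a * 2; if c = '#' then e + 1 else e) 0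
      = parseBin2 (l.map (fun c => if c = '#' then '1' else '0')) := by
  unfold parseBin2
  rw [List.foldl_map]
  congr 1
  funext a c
  by_cases h : c = '#' <;> simp [h]

theorem encodeChar_spec : Claim_equal_encodeChar := by
  intro imStr figure letter _
  unfold Spec_encodeChar encodeChar encodeChar_alt
  simp only [PySem.Str.slice?_none_none_neg_one, Option.getD_some, String.toList_ofList]
  rw [foldA_eq_parse_map]
  by_cases h : imStr.toList = []
  · simp [h, parseBin2]
  · simp [h, parseBin2]
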